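-- pv_equiv track=rewrite | github.com/JohannesBoll/RegMenter | src/list_identification/postprocessing/SBDPostprocessing.py | completion0
-- ===== SOURCE A (Python) =====
-- def completion0(y):
--     """
--     complete sequences without closing E- Tag
--
--     :param y: List of predicted labels of a document
--     :return: List of completed labels of the document
--     """
--     start_tag = y[0]
--     start_tag_id = 0
--     for i in range(len(y)):
--         if i + 1 < len(y) and y[i + 1] in ['B-SEN', 'B-IT', 'S-SEN']:
--             if y[i] == 'O':
--                 if start_tag == 'B-IT':
--                     y[i] = 'E-IT'
--                 elif start_tag == 'B-SEN':
--                     y[i] = 'E-SEN'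
--                 elif start_tag == 'O':
--                     y[start_tag_id] = 'B-SEN'
--                     y[i] = 'E-SEN'
--             start_tag = y[i + 1]
--             start_tag_id = i + 1
--     return y
-- ===== SOURCE B (Python) =====
-- def completion0(y):
--     """
--     complete sequences without closing E- Tag  (mutates y in place, like A)
--     """
--     tags = ('B-SEN', 'B-IT', 'S-SEN')
--     bounds = [0] + [j for j in range(1, len(y)) if y[j] in tags]
--     for prev, cur in zip(bounds, bounds[1:]):
--         i = cur - 1
--         if y[i] == 'O':
--             opener = y[prev]
--             if opener == 'B-IT':
--                 y[i] = 'E-IT'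
--             elif opener == 'B-SEN':
--                 y[i] = 'E-SEN'
--             elif opener == 'O':
--                 y[prev] = 'B-SEN'
--                 y[i] = 'E-SEN'
--     return y
-- ===== Notes on version B (the rewrite author's own statement) =====
-- stated objective: alternative
-- what changed: B first materializes the list of segment-boundary indices and then closes segments in a pair-wise pass over consecutive boundaries, replacing A's single index scan that threads start_tag/start_tag_id scalar state.
-- crash fix: On the empty list A raises IndexError (it reads y[0] before the loop) while B returns []. — e.g. on completion0([]): A raises IndexError, B returns []
import Mathlib
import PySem

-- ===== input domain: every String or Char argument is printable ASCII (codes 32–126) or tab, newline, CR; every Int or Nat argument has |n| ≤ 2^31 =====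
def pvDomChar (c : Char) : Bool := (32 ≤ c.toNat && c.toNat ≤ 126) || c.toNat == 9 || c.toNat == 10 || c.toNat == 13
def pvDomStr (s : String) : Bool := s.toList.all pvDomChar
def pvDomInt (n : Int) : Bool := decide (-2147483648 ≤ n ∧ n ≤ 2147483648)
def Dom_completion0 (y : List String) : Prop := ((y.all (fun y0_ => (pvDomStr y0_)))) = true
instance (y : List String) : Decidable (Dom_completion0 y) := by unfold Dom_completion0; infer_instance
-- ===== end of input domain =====

-- B closes the unclosed segments by a pair-wise pass over a materialized list of boundary
-- indices instead of A's scalar start_tag/start_tag_id state threading ('alternative', same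
-- cost). Both Pythons mutate y in place and return it; the equivalence here is about the
-- returned value. On [] A raises IndexError (Pre_ excludes it) while B returns [].

-- ===== PORT A =====
def completion0 (y : List String) : List String :=
  match y with
  | [] => []   -- Python: 'start_tag = y[0]' raises IndexError here; excluded by Pre_completion0
  | t :: _ =>
    ((PySem.List.pyRange 0 (y.length : Int) 1).foldl
      (fun (s : List String × String × Int) i =>
        let arr := s.1
        let st := s.2.1
        let sid := s.2.2
        if i + 1 < (arr.length : Int) ∧
            PySem.List.pyGetD arr (i + 1) "" ∈ (["B-SEN", "B-IT", "S-SEN"] : List String) then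
          let arr' :=
            if PySem.List.pyGetD arr i "" = "O" then
              if st = "B-IT" then PySem.List.pySetD arr i "E-IT"
              else if st = "B-SEN" then PySem.List.pySetD arr i "E-SEN"
              else if st = "O" then
                PySem.List.pySetD (PySem.List.pySetD arr sid "B-SEN") i "E-SEN"
              else arr
            else arr
          (arr', PySem.List.pyGetD arr' (i + 1) "", i + 1)
        else (arr, st, sid))
      (y, t, (0 : Int))).1

-- ===== PORT B =====
def completion0_alt (y : List String) : List String :=
  let bounds : List Int :=
    0 :: (PySem.List.pyRange 1 (y.length : Int) 1).filter
      (fun j => decide (PySem.List.pyGetD y j "" ∈ (["B-SEN", "B-IT", "S-SEN"] : List String)))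
  (bounds.zip bounds.tail).foldl
    (fun arr pc =>
      let i := pc.2 - 1
      if PySem.List.pyGetD arr i "" = "O" then
        let opener := PySem.List.pyGetD arr pc.1 ""
        if opener = "B-IT" then PySem.List.pySetD arr i "E-IT"
        else if opener = "B-SEN" then PySem.List.pySetD arr i "E-SEN"
        else if opener = "O" then
          PySem.List.pySetD (PySem.List.pySetD arr pc.1 "B-SEN") i "E-SEN"
        else arr
      else arr)
    y

-- ===== PRECONDITION & SPEC =====
def Pre_completion0 (y : List String) : Prop := y ≠ []
instance (y : List String) : Decidable (Pre_completion0 y) := by unfold Pre_completion0; infer_instance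
def pvWitness_completion0 : List String := (["O", "B-SEN", "O"])

-- On the empty list A raises IndexError (it reads y[0] before the loop) while B returns [].
def Raises_completion0 (y : List String) : Prop := y = []
instance (y : List String) : Decidable (Raises_completion0 y) := by unfold Raises_completion0; infer_instance
def pvRaiseWitness_completion0 : List String := ([])
def pvRaiseWitnessOut_completion0 : List String := []

def Spec_completion0 (y : List String) (out : List String) : Prop := out = completion0_alt y
instance (y : List String) (out : List String) : Decidable (Spec_completion0 y out) := by unfold Spec_completion0; infer_instance

-- ===== CLAIM (what is proved, stated in full; the proofs are below) =====
def Claim_equal_completion0 : Prop := ∀ (y : List String), Dom_completion0 y → Pre_completion0 y → Spec_completion0 y (completion0 y)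
def Claim_raises_completion0 : Prop := (∀ (y : List String), Dom_completion0 y → Raises_completion0 y → ¬ Pre_completion0 y) ∧ (Dom_completion0 (pvRaiseWitness_completion0) ∧ Raises_completion0 (pvRaiseWitness_completion0) ∧ completion0_alt (pvRaiseWitness_completion0) = pvRaiseWitnessOut_completion0)

-- ===== LEMMAS AND PROOFS =====

-- proof-only helpers: pv-vocabulary for both ports' loop bodies
def pvG (xs : List String) (i : Int) : String := PySem.List.pyGetD xs i ""

def pvS (xs : List String) (i : Int) (v : String) : List String := PySem.List.pySetD xs i v

def pvTags : List String := ["B-SEN", "B-IT", "S-SEN"]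

def pvClose (arr : List String) (op : String) (sid i : Int) : List String :=
  if pvG arr i = "O" then
    if op = "B-IT" then pvS arr i "E-IT"
    else if op = "B-SEN" then pvS arr i "E-SEN"
    else if op = "O" then pvS (pvS arr sid "B-SEN") i "E-SEN"
    else arr
  else arr

def pvStepA (s : List String × String × Int) (i : Int) : List String × String × Int :=
  if i + 1 < (s.1.length : Int) ∧ pvG s.1 (i + 1) ∈ pvTags then
    (pvClose s.1 s.2.1 s.2.2 i, pvG (pvClose s.1 s.2.1 s.2.2 i) (i + 1), i + 1)
  else s

def pvStepB (arr : List String) (pc : Int × Int) : List String :=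
  pvClose arr (pvG arr pc.1) pc.1 (pc.2 - 1)

theorem completion0_cons (t : String) (ys : List String) :
    completion0 (t :: ys) =
      ((PySem.List.pyRange 0 ((t :: ys).length : Int) 1).foldl pvStepA ((t :: ys), t, (0 : Int))).1 := rfl

theorem completion0_alt_eq (y : List String) :
    completion0_alt y =
      (((0 : Int) :: (PySem.List.pyRange 1 (y.length : Int) 1).filter
          (fun j => decide (pvG y j ∈ pvTags))).zip
        ((PySem.List.pyRange 1 (y.length : Int) 1).filter
          (fun j => decide (pvG y j ∈ pvTags)))).foldl pvStepB y := rfl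

theorem pvStepA_eq (arr : List String) (st : String) (sid i : Int) :
    pvStepA (arr, st, sid) i =
      if i + 1 < (arr.length : Int) ∧ pvG arr (i + 1) ∈ pvTags then
        (pvClose arr st sid i, pvG (pvClose arr st sid i) (i + 1), i + 1)
      else (arr, st, sid) := rfl

theorem pvG_out {xs : List String} {i : Int} (h : (xs.length : Int) ≤ i) : pvG xs i = "" := by
  unfold pvG
  simp only [PySem.List.pyGetD, PySem.List.pyGet?, PySem.List.pyIdx?]
  split_ifs with h1 h2 <;> simp_all <;> omega

theorem pvS_length (xs : List String) (i : Int) (v : String) :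
    (pvS xs i v).length = xs.length := PySem.List.length_pySetD xs i v

theorem pvG_pvS (xs : List String) {i : Int} (j : Int) (v : String)
    (hi0 : 0 ≤ i) (hil : i < (xs.length : Int)) (hj : 0 ≤ j) :
    pvG (pvS xs i v) j = if j = i then v else pvG xs j := by
  have hset : pvS xs i v = xs.set i.toNat v := PySem.List.pySetD_of_nonneg xs v hi0
  by_cases hjl : j < (xs.length : Int)
  · have h1 : pvG (pvS xs i v) j = (xs.set i.toNat v)[j.toNat]'(by simp; omega) := by
      unfold pvG; rw [hset]; exact PySem.List.pyGetD_eq_getElem _ _ hj (by simp; omega)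
    have h2 : pvG xs j = xs[j.toNat]'(by omega) := by
      unfold pvG; exact PySem.List.pyGetD_eq_getElem _ _ hj hjl
    rw [h1, h2, List.getElem_set]
    by_cases hji : j = i
    · rw [if_pos (by omega), if_pos hji]
    · rw [if_neg (by omega), if_neg hji]
  · have hji : ¬ j = i := by omega
    rw [if_neg hji, pvG_out (xs := pvS xs i v) (by rw [hset]; simp; omega), pvG_out (by omega)]

theorem pvClose_length (arr : List String) (op : String) (sid i : Int) :
    (pvClose arr op sid i).length = arr.length := by
  unfold pvClose
  split_ifs <;> simp [pvS_length]

theorem pvG_pvClose (arr : List String) (op : String) {sid i : Int} (j : Int)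
    (hsid0 : 0 ≤ sid) (hsidl : sid < (arr.length : Int))
    (hi0 : 0 ≤ i) (hil : i < (arr.length : Int))
    (hj0 : 0 ≤ j) (hji : j ≠ i) (hjs : j ≠ sid) :
    pvG (pvClose arr op sid i) j = pvG arr j := by
  unfold pvClose
  split_ifs
  · rw [pvG_pvS arr j _ hi0 hil hj0, if_neg hji]
  · rw [pvG_pvS arr j _ hi0 hil hj0, if_neg hji]
  · rw [pvG_pvS _ j _ hi0 (by rw [pvS_length]; exact hil) hj0, if_neg hji,
        pvG_pvS arr j _ hsid0 hsidl hj0, if_neg hjs]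
  · rfl
  · rfl

theorem pvMain (y : List String) (k : Nat) :
    ∀ (a p : Int) (arr : List String),
      0 ≤ p → p ≤ a → a ≤ (y.length : Int) → k = ((y.length : Int) - a).toNat →
      arr.length = y.length →
      (∀ j : Int, p ≤ j → 0 ≤ j → pvG arr j = pvG y j) →
      ((PySem.List.pyRange a (y.length : Int) 1).foldl pvStepA (arr, pvG y p, p)).1
        = ((p :: (PySem.List.pyRange (a + 1) (y.length : Int) 1).filter
              (fun j => decide (pvG y j ∈ pvTags))).zip
            ((PySem.List.pyRange (a + 1) (y.length : Int) 1).filter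
              (fun j => decide (pvG y j ∈ pvTags)))).foldl pvStepB arr := by
  induction k with
  | zero =>
    intro a p arr hp0 hpa han hk hlen hag
    rw [PySem.List.pyRange_one_eq_nil (by omega), PySem.List.pyRange_one_eq_nil (by omega)]
    simp
  | succ k ih =>
    intro a p arr hp0 hpa han hk hlen hag
    have haN : a < (y.length : Int) := by omega
    have hlenI : (arr.length : Int) = (y.length : Int) := by exact_mod_cast congrArg Nat.cast hlen
    rw [PySem.List.pyRange_one_cons haN, List.foldl_cons, pvStepA_eq]
    by_cases hC : a + 1 < (y.length : Int) ∧ pvG y (a + 1) ∈ pvTags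
    · -- a+1 is a boundary: both sides close the current segment the same way
      have hcond : a + 1 < (arr.length : Int) ∧ pvG arr (a + 1) ∈ pvTags := by
        refine ⟨by omega, ?_⟩
        rw [hag (a + 1) (by omega) (by omega)]; exact hC.2
      rw [if_pos hcond]
      have hst : pvG (pvClose arr (pvG y p) p a) (a + 1) = pvG y (a + 1) := by
        rw [pvG_pvClose arr _ (a + 1) hp0 (by omega) (by omega) (by omega) (by omega)
              (by omega) (by omega)]
        exact hag (a + 1) (by omega) (by omega)
      rw [hst]
      have ihres := ih (a + 1) (a + 1) (pvClose arr (pvG y p) p a) (by omega) le_rfl (by omega)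
        (by omega) (by rw [pvClose_length]; exact hlen)
        (by intro j hj hj0
            rw [pvG_pvClose arr _ j hp0 (by omega) (by omega) (by omega) hj0 (by omega) (by omega)]
            exact hag j (by omega) hj0)
      rw [ihres]
      have hfilter : (PySem.List.pyRange (a + 1) (y.length : Int) 1).filter
              (fun j => decide (pvG y j ∈ pvTags))
          = (a + 1) :: (PySem.List.pyRange (a + 1 + 1) (y.length : Int) 1).filter
              (fun j => decide (pvG y j ∈ pvTags)) := by
        rw [PySem.List.pyRange_one_cons hC.1, List.filter_cons, if_pos (by simpa using hC.2)]
      rw [hfilter, List.zip_cons_cons, List.foldl_cons]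
      have hstep : pvStepB arr (p, a + 1) = pvClose arr (pvG y p) p a := by
        unfold pvStepB
        simp only
        rw [show a + 1 - 1 = a from by ring, hag p le_rfl hp0]
      rw [hstep]
    · -- a+1 is not a boundary: A's step is a no-op and the filter drops a+1
      have hcond : ¬ (a + 1 < (arr.length : Int) ∧ pvG arr (a + 1) ∈ pvTags) := by
        intro hc
        exact hC ⟨by omega, by rw [← hag (a + 1) (by omega) (by omega)]; exact hc.2⟩
      rw [if_neg hcond]
      have ihres := ih (a + 1) p arr hp0 (by omega) (by omega) (by omega) hlen hag
      rw [ihres]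
      have hfilter : (PySem.List.pyRange (a + 1 + 1) (y.length : Int) 1).filter
              (fun j => decide (pvG y j ∈ pvTags))
          = (PySem.List.pyRange (a + 1) (y.length : Int) 1).filter
              (fun j => decide (pvG y j ∈ pvTags)) := by
        by_cases h2 : a + 1 < (y.length : Int)
        · rw [PySem.List.pyRange_one_cons h2, List.filter_cons,
              if_neg (by simp; exact fun hm => hC ⟨h2, hm⟩)]
        · rw [PySem.List.pyRange_one_eq_nil (by omega), PySem.List.pyRange_one_eq_nil (by omega)]
      rw [hfilter]

-- ===== VERDICT (by name: the statement is the Claim_ definition above) =====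
theorem completion0_spec : Claim_equal_completion0 := by
  intro y hdom hpre
  unfold Spec_completion0
  cases y with
  | nil => exact absurd rfl hpre
  | cons t ys =>
    rw [completion0_cons, completion0_alt_eq]
    have hm := pvMain (t :: ys) (((t :: ys).length : Int) - 0).toNat 0 0 (t :: ys)
      le_rfl le_rfl (by omega) rfl rfl (fun j _ _ => rfl)
    simp only [zero_add] at hm
    have h0 : pvG (t :: ys) 0 = t := PySem.List.pyGetD_zero_cons t ys ""
    rw [h0] at hm
    exact hm

theorem completion0_raises : Claim_raises_completion0 := by
  unfold Claim_raises_completion0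
  exact ⟨by intro y _ h hp; exact hp h, by decide⟩

-- self-check: the raise-witness value recorded above is the one the raises theorem certifies
theorem completion0_raises_witness_ok :
    completion0_alt pvRaiseWitness_completion0 = pvRaiseWitnessOut_completion0 :=
  completion0_raises.2.2.2
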